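-- pv_equiv track=rewrite | github.com/wrrulos/mcptool | src/decoration/mini_messages_format.py | minecraft_colors
-- ===== SOURCE A (Python) =====
-- def minecraft_colors(text):
--     """
--     Replace MiniMessage colored characters with Minecraft color codes.
--
--     Args:
--         text (str): Text.
--
--     Returns:
--         str: New text.
--     """
--
--     codes = {
--         '<reset><black>': '0',
--         '<reset><dark_blue>': '1',
--         '<reset><dark_green>': '2',
--         '<reset><dark_aqua>': '3',
--         '<reset><dark_red>': '4',
--         '<reset><dark_purple>': '5',
--         '<reset><gold>': '6',
--         '<reset><gray>': '7',
--         '<reset><dark_gray>': '8',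
--         '<reset><blue>': '9',
--         '<reset><green>': 'a',
--         '<reset><aqua>': 'b',
--         '<reset><red>': 'c',
--         '<reset><light_purple>': 'd',
--         '<reset><yellow>': 'e',
--         '<reset><white>': 'f',
--         '<obfuscated>': 'k',
--         '<bold>': 'l',
--         '<strikethrough>': 'm',
--         '<underlined>': 'n',
--         '<italic>': 'o',
--         '<reset>': 'r',
--     }
--
--     for code in codes.items():
--         text = text.replace(code[0], f'&{code[1]}').replace(code[0], f'&{code[1]}')
--
--     text = text.replace('<newline>', '\n')
--     return text
-- ===== SOURCE B (Python) =====
-- def minecraft_colors(text):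
--     """
--     Replace MiniMessage colored characters with Minecraft color codes.
--
--     Single left-to-right pass over the text with an ordered mapping
--     (combined <reset><color> keys before the bare <reset> key), instead
--     of one full replace pass per code.
--     """
--     codes = {
--         '<reset><black>': '0',
--         '<reset><dark_blue>': '1',
--         '<reset><dark_green>': '2',
--         '<reset><dark_aqua>': '3',
--         '<reset><dark_red>': '4',
--         '<reset><dark_purple>': '5',
--         '<reset><gold>': '6',
--         '<reset><gray>': '7',
--         '<reset><dark_gray>': '8',
--         '<reset><blue>': '9',
--         '<reset><green>': 'a',
--         '<reset><aqua>': 'b',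
--         '<reset><red>': 'c',
--         '<reset><light_purple>': 'd',
--         '<reset><yellow>': 'e',
--         '<reset><white>': 'f',
--         '<obfuscated>': 'k',
--         '<bold>': 'l',
--         '<strikethrough>': 'm',
--         '<underlined>': 'n',
--         '<italic>': 'o',
--         '<reset>': 'r',
--     }
--     mapping = {k: '&' + v for k, v in codes.items()}
--     mapping['<newline>'] = '\n'
--     out = []
--     i = 0
--     n = len(text)
--     while i < n:
--         for key, repl in mapping.items():
--             if text.startswith(key, i):
--                 out.append(repl)
--                 i += len(key)
--                 break
--         else:
--             out.append(text[i])
--             i += 1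
--     return ''.join(out)
-- ===== Notes on version B (the rewrite author's own statement) =====
-- stated objective: alternative
-- what changed: Replaces A's 45 sequential str.replace passes (two per color code plus the <newline> pass, each rescanning the whole string) with a single left-to-right scan over the text that at each position emits the code of the first matching key in the same precedence order (combined <reset><color> keys before bare <reset>), building the output once.
import Mathlib
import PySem

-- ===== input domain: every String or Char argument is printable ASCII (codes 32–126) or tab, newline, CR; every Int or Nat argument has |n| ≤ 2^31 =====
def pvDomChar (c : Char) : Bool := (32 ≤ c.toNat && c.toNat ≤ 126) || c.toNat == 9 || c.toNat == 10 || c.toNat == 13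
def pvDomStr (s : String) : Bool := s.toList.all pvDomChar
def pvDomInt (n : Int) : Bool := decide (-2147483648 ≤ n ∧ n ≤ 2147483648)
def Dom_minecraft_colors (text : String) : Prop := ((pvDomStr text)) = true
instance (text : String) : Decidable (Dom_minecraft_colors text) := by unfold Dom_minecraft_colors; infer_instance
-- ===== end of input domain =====

-- B replaces A's 45 sequential str.replace passes by ONE left-to-right scan emitting, at each
-- position, the replacement of the first matching key in the same precedence order (alternative
-- decomposition, not claimed faster).

-- ===== PORT A =====

-- Python `str.replace` for a (nonempty) needle: leftmost, non-overlapping, continue after the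
-- replacement.  Exact for the needles used here (all nonempty).
def pvRepl (k r : List Char) : List Char → List Char
  | [] => []
  | c :: t =>
    if k.isPrefixOf (c :: t) then r ++ pvRepl k r (t.drop (k.length - 1))
    else c :: pvRepl k r t
termination_by l => l.length
decreasing_by
  · simp [List.length_drop]
  · simp

def pvCodes : List (List Char × Char) :=
  [("<reset><black>".toList, '0'),
   ("<reset><dark_blue>".toList, '1'),
   ("<reset><dark_green>".toList, '2'),
   ("<reset><dark_aqua>".toList, '3'),
   ("<reset><dark_red>".toList, '4'),
   ("<reset><dark_purple>".toList, '5'),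
   ("<reset><gold>".toList, '6'),
   ("<reset><gray>".toList, '7'),
   ("<reset><dark_gray>".toList, '8'),
   ("<reset><blue>".toList, '9'),
   ("<reset><green>".toList, 'a'),
   ("<reset><aqua>".toList, 'b'),
   ("<reset><red>".toList, 'c'),
   ("<reset><light_purple>".toList, 'd'),
   ("<reset><yellow>".toList, 'e'),
   ("<reset><white>".toList, 'f'),
   ("<obfuscated>".toList, 'k'),
   ("<bold>".toList, 'l'),
   ("<strikethrough>".toList, 'm'),
   ("<underlined>".toList, 'n'),
   ("<italic>".toList, 'o'),
   ("<reset>".toList, 'r')]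

-- A: for each code, text = text.replace(k, '&'+v).replace(k, '&'+v); finally replace '<newline>'.
def minecraft_colors (text : String) : String :=
  String.mk (pvRepl "<newline>".toList ['\n']
    (pvCodes.foldl (fun t kc => pvRepl kc.1 ['&', kc.2] (pvRepl kc.1 ['&', kc.2] t)) text.toList))

-- ===== PORT B =====

-- B's `codes` dict (same table as A's).
def pvCodesB : List (List Char × Char) :=
  [("<reset><black>".toList, '0'),
   ("<reset><dark_blue>".toList, '1'),
   ("<reset><dark_green>".toList, '2'),
   ("<reset><dark_aqua>".toList, '3'),
   ("<reset><dark_red>".toList, '4'),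
   ("<reset><dark_purple>".toList, '5'),
   ("<reset><gold>".toList, '6'),
   ("<reset><gray>".toList, '7'),
   ("<reset><dark_gray>".toList, '8'),
   ("<reset><blue>".toList, '9'),
   ("<reset><green>".toList, 'a'),
   ("<reset><aqua>".toList, 'b'),
   ("<reset><red>".toList, 'c'),
   ("<reset><light_purple>".toList, 'd'),
   ("<reset><yellow>".toList, 'e'),
   ("<reset><white>".toList, 'f'),
   ("<obfuscated>".toList, 'k'),
   ("<bold>".toList, 'l'),
   ("<strikethrough>".toList, 'm'),
   ("<underlined>".toList, 'n'),
   ("<italic>".toList, 'o'),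
   ("<reset>".toList, 'r')]

-- B's `mapping` = {k: '&'+v for k,v in codes.items()} plus '<newline>' -> '\n', in order.
def pvMapping : List (List Char × List Char) :=
  pvCodesB.map (fun kc => (kc.1, ['&', kc.2])) ++ [("<newline>".toList, ['\n'])]

-- B's while-loop: at each position, the first key of `mapping` that matches is emitted
-- (`find?` = the for/break search), otherwise the character is copied.
def pvScan : List Char → List Char
  | [] => []
  | c :: t =>
    match pvMapping.find? (fun kr => kr.1.isPrefixOf (c :: t)) with
    | some (k, _r) => _r ++ pvScan (t.drop (k.length - 1))
    | none => c :: pvScan t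
termination_by l => l.length
decreasing_by
  · simp [List.length_drop]
  · simp

def minecraft_colors_alt (text : String) : String := String.mk (pvScan text.toList)

-- ===== PRECONDITION & SPEC =====
def Spec_minecraft_colors (text : String) (out : String) : Prop := out = minecraft_colors_alt text
instance (text : String) (out : String) : Decidable (Spec_minecraft_colors text out) := by unfold Spec_minecraft_colors; infer_instance

-- ===== CLAIM (what is proved, stated in full; the proofs are below) =====
def Claim_equal_minecraft_colors : Prop := ∀ (text : String), Dom_minecraft_colors text → Spec_minecraft_colors text (minecraft_colors text)

-- ===== LEMMAS AND PROOFS =====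

-- A's fold, recast as a single left fold of single `replace` passes (each code twice, newline once).
def pvStep (t : List Char) (kr : List Char × List Char) : List Char := pvRepl kr.1 kr.2 t

def pvPasses : List (List Char × List Char) :=
  (pvCodes.map fun kc => (kc.1, ['&', kc.2])).flatMap (fun kr => [kr, kr])
    ++ [("<newline>".toList, ['\n'])]

def pvAFold (t : List Char) : List Char := pvPasses.foldl pvStep t

-- sanity facts about the key/replacement table, checked by computation
theorem pvOK : ∀ kr ∈ pvMapping, kr.1 ≠ [] ∧ kr.1.head? = some '<' ∧ '&' ∉ kr.1 ∧ '\n' ∉ kr.1 ∧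
    kr.2 ≠ [] ∧ (kr.2.head? = some '&' ∨ kr.2.head? = some '\n') ∧ '<' ∉ kr.2 := by decide

-- no key matches strictly inside another key (for any continuation of the text)
theorem pvPP : ∀ a ∈ pvMapping, ∀ b ∈ pvMapping, ∀ p, p < a.1.length → 0 < p →
    ¬ b.1 <+: a.1.drop p ∧ ¬ a.1.drop p <+: b.1 := by decide

theorem pvMemPasses : ∀ kr ∈ pvPasses, kr ∈ pvMapping := by decide

-- ---- pvRepl basics ----

theorem repl_nil (k r : List Char) : pvRepl k r [] = [] := by simp [pvRepl]

theorem repl_pos (k r u : List Char) (hk : k ≠ []) : pvRepl k r (k ++ u) = r ++ pvRepl k r u := by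
  obtain ⟨c, k', rfl⟩ := List.exists_cons_of_ne_nil hk
  have hpre : (c :: k').isPrefixOf (c :: (k' ++ u)) := by
    exact List.isPrefixOf_iff_prefix.mpr ⟨u, by simp⟩
  simp [pvRepl, hpre]

theorem repl_neg (k r : List Char) (c : Char) (t : List Char) (h : ¬ k <+: (c :: t)) :
    pvRepl k r (c :: t) = c :: pvRepl k r t := by
  have : ¬ k.isPrefixOf (c :: t) = true := by
    simpa [List.isPrefixOf_iff_prefix] using h
  simp [pvRepl, this]

-- ---- clean-prefix preservation: replacements start with '&' or '\n', keys contain neither ----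

def pvAFP (u' u : List Char) : Prop :=
  ∀ P : List Char, P <+: u' → '&' ∉ P → '\n' ∉ P → P <+: u

theorem afp_refl (u : List Char) : pvAFP u u := fun _ h _ _ => h

theorem afp_trans {a b c : List Char} (h1 : pvAFP a b) (h2 : pvAFP b c) : pvAFP a c :=
  fun P hp h1' h2' => h2 P (h1 P hp h1' h2') h1' h2'

theorem afp_repl (k r : List Char)
    (hr : r.head? = some '&' ∨ r.head? = some '\n') :
    ∀ n u, u.length ≤ n → pvAFP (pvRepl k r u) u := by
  intro n
  induction n with
  | zero =>
    intro u hu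
    have : u = [] := List.eq_nil_of_length_eq_zero (Nat.le_zero.mp hu)
    subst this; simp [repl_nil]; exact afp_refl []
  | succ n ih =>
    intro u hu
    match u with
    | [] => simp [repl_nil]; exact afp_refl []
    | c :: t =>
      by_cases hp : k <+: (c :: t)
      · have hpb : k.isPrefixOf (c :: t) = true := List.isPrefixOf_iff_prefix.mpr hp
        intro P hP hamp hnl
        rw [pvRepl, if_pos hpb] at hP
        match P, hP with
        | [], _ => exact List.nil_prefix
        | d :: P', hP =>
          exfalso
          have hr' : r ≠ [] := by rcases hr with h | h <;> (intro he; simp [he] at h)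
          have hhead : (r ++ pvRepl k r (t.drop (k.length - 1))).head? = some d := by
            obtain ⟨s, hs⟩ := hP
            rw [← hs]; simp
          rw [List.head?_append_of_ne_nil _ hr'] at hhead
          rcases hr with h | h
          · rw [h] at hhead
            obtain rfl : '&' = d := Option.some_inj.mp hhead
            simp at hamp
          · rw [h] at hhead
            obtain rfl : '\n' = d := Option.some_inj.mp hhead
            simp at hnl
      · rw [repl_neg k r c t hp]
        intro P hP hamp hnl
        match P, hP with
        | [], _ => exact List.nil_prefix
        | d :: P', hP =>
          obtain ⟨s, hs⟩ := hP
          have hdc : d = c := by simpa using congrArg List.head? hs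
          subst hdc
          
          have hP' : P' <+: pvRepl k r t := ⟨s, by simpa using hs⟩
          have ht : t.length ≤ n := by simpa using Nat.lt_succ_iff.mp (by simpa using hu)
          have := ih t ht P' hP' (fun h => hamp (by simp [h])) (fun h => hnl (by simp [h]))
          exact List.cons_prefix_cons.mpr ⟨rfl, this⟩

-- ---- non-matching helpers ----

theorem not_prefix_append {k b w : List Char} (h1 : ¬ k <+: b) (h2 : ¬ b <+: k) :
    ¬ k <+: (b ++ w) := by
  intro h
  rcases List.prefix_or_prefix_of_prefix h (List.prefix_append b w) with h' | h'
  · exact h1 h'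
  · exact h2 h'

theorem head_ne_not_prefix {k b w : List Char} (hk : k.head? = some '<') (hb : b ≠ [])
    (h : ∀ c ∈ b, c ≠ '<') : ¬ k <+: (b ++ w) := by
  intro hpre
  obtain ⟨d, b', rfl⟩ := List.exists_cons_of_ne_nil hb
  obtain ⟨c, k', rfl⟩ := List.exists_cons_of_ne_nil (by intro he; simp [he] at hk : k ≠ [])
  have hc : c = '<' := by simpa using hk
  obtain ⟨s, hs⟩ := hpre
  have hcd : c = d := by simpa using congrArg List.head? hs
  exact h d (by simp) (by rw [← hcd, hc])

-- ---- commuting a replace / a fold of replaces past an unmatched prefix ----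

theorem repl_append (k r : List Char) : ∀ (a : List Char) (u : List Char),
    (∀ p, p < a.length → ¬ k <+: (a.drop p ++ u)) →
    pvRepl k r (a ++ u) = a ++ pvRepl k r u := by
  intro a
  induction a with
  | nil => intro u _; simp
  | cons c a' ih =>
    intro u h
    have h0 : ¬ k <+: (c :: (a' ++ u)) := by simpa using h 0 (by simp)
    rw [List.cons_append, repl_neg k r c (a' ++ u) h0,
      ih u (fun p hp => by simpa using h (p + 1) (by simpa using hp))]
    simp

theorem repl_ltfree (k r : List Char) (hk : k.head? = some '<') (a u : List Char)
    (ha : ∀ c ∈ a, c ≠ '<') : pvRepl k r (a ++ u) = a ++ pvRepl k r u := by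
  apply repl_append
  intro p hp
  refine head_ne_not_prefix hk ?_ ?_
  · intro he
    have := congrArg List.length he
    simp [List.length_drop] at this
    omega
  · intro c hc; exact ha c (List.mem_of_mem_drop hc)

theorem fold_ltfree (P : List (List Char × List Char))
    (hP : ∀ kr ∈ P, kr.1.head? = some '<') (a : List Char) (ha : ∀ c ∈ a, c ≠ '<') :
    ∀ u, P.foldl pvStep (a ++ u) = a ++ P.foldl pvStep u := by
  induction P with
  | nil => intro u; simp
  | cons kr P' ih =>
    intro u
    rw [List.foldl_cons, List.foldl_cons]
    show P'.foldl pvStep (pvRepl kr.1 kr.2 (a ++ u)) = a ++ P'.foldl pvStep (pvRepl kr.1 kr.2 u)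
    rw [repl_ltfree kr.1 kr.2 (hP kr (by simp)) a u ha]
    exact ih (fun x hx => hP x (by simp [hx])) _

-- the central lemma: all passes whose keys do not match at position 0 of `a ++ u`
-- commute past the key-prefix `a`
theorem fold_prefix_commute (a u : List Char) :
    ∀ (P : List (List Char × List Char)), (∀ kr ∈ P, kr ∈ pvMapping) →
    (∀ kr ∈ P, ¬ kr.1 <+: (a ++ u)) →
    (∀ kr ∈ P, ∀ p, p < a.length → 0 < p → ¬ kr.1 <+: a.drop p ∧ ¬ a.drop p <+: kr.1) →
    ∀ u', pvAFP u' u → P.foldl pvStep (a ++ u') = a ++ P.foldl pvStep u' := by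
  intro P
  induction P with
  | nil => intro _ _ _ u' _; simp
  | cons kr P' ih =>
    intro hmem h0 hpp u' hafp
    obtain ⟨k', r'⟩ := kr
    have hk'ok := pvOK (k', r') (hmem _ (by simp))
    rw [List.foldl_cons, List.foldl_cons]
    show P'.foldl pvStep (pvRepl k' r' (a ++ u')) = a ++ P'.foldl pvStep (pvRepl k' r' u')
    have hstep : pvRepl k' r' (a ++ u') = a ++ pvRepl k' r' u' := by
      apply repl_append
      intro p hp
      rcases Nat.eq_zero_or_pos p with rfl | hpos
      · -- position 0: a full-key match here would contradict h0, via clean-prefix preservation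
        simp only [List.drop_zero]
        intro hk
        rcases List.prefix_or_prefix_of_prefix hk (List.prefix_append a u') with h' | h'
        · exact h0 (k', r') (by simp) (h'.trans (List.prefix_append a u))
        · -- a <+: k' : the rest of k' is a clean prefix of u', hence of u
          have hext : a ++ k'.drop a.length = k' := List.prefix_iff_eq_append.mp h'
          have hextpre : k'.drop a.length <+: u' := by
            obtain ⟨s, hs⟩ := hk
            refine ⟨s, ?_⟩
            have : a ++ (k'.drop a.length ++ s) = a ++ u' := by
              rw [← List.append_assoc, hext, hs]
            exact (List.append_right_inj a).mp this
          have hextu : k'.drop a.length <+: u :=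
            hafp _ hextpre
              (fun h => hk'ok.2.2.1 (List.mem_of_mem_drop h))
              (fun h => hk'ok.2.2.2.1 (List.mem_of_mem_drop h))
          apply h0 (k', r') (by simp)
          obtain ⟨s, hs⟩ := hextu
          exact ⟨s, by rw [← hs, ← List.append_assoc, hext]⟩
      · obtain ⟨h1, h2⟩ := hpp (k', r') (by simp) p hp hpos
        exact not_prefix_append h1 h2
    rw [hstep]
    have hafp' : pvAFP (pvRepl k' r' u') u :=
      afp_trans (afp_repl k' r' hk'ok.2.2.2.2.2.1 u'.length u' le_rfl) hafp
    exact ih (fun x hx => hmem x (by simp [hx])) (fun x hx => h0 x (by simp [hx]))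
      (fun x hx => hpp x (by simp [hx])) _ hafp'

-- (more helper lemmas and the main induction)
theorem fold_input_nil (P : List (List Char × List Char)) : P.foldl pvStep [] = [] := by
  induction P with
  | nil => rfl
  | cons kr P' ih => rw [List.foldl_cons]; show P'.foldl pvStep (pvRepl kr.1 kr.2 []) = []
                     rw [repl_nil]; exact ih


-- ---- assembling A's fold, and the find?-split of B's key search ----

def pvNL : List Char × List Char := ("<newline>".toList, ['\n'])
def pvM : List (List Char × List Char) := pvCodes.map fun kc => (kc.1, ['&', kc.2])

theorem pvMapping_eq : pvMapping = pvM ++ [pvNL] := rfl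
theorem pvPasses_eq : pvPasses = pvM.flatMap (fun kr => [kr, kr]) ++ [pvNL] := rfl
theorem pvNL_mem : pvNL ∈ pvMapping := by decide

theorem mem_dup {α : Type} {x : α} {L : List α} : x ∈ L.flatMap (fun y => [y, y]) ↔ x ∈ L := by
  simp

theorem foldl_dup (L : List (List Char × List Char)) : ∀ t,
    (L.flatMap fun x => [x, x]).foldl pvStep t =
      L.foldl (fun t kr => pvRepl kr.1 kr.2 (pvRepl kr.1 kr.2 t)) t := by
  induction L with
  | nil => intro t; rfl
  | cons x L ih =>
    intro t
    simp only [List.flatMap_cons, List.foldl_append, List.foldl_cons, List.foldl_nil, ih]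
    rfl

theorem A_eq (t : List Char) : pvAFold t =
    pvRepl "<newline>".toList ['\n']
      (pvCodes.foldl (fun t kc => pvRepl kc.1 ['&', kc.2] (pvRepl kc.1 ['&', kc.2] t)) t) := by
  rw [pvAFold, pvPasses_eq, List.foldl_append, foldl_dup]
  simp [pvStep, pvNL, pvM, List.foldl_map]

theorem find?_split {α : Type} (p : α → Bool) : ∀ (l : List α) (b : α), l.find? p = some b →
    ∃ as bs, l = as ++ b :: bs ∧ ∀ a ∈ as, ¬ p a = true := by
  intro l
  induction l with
  | nil => intro b h; simp at h
  | cons x l ih =>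
    intro b h
    by_cases hx : p x
    · have : x = b := by simpa [List.find?_cons, hx] using h
      exact ⟨[], l, by simp [this], by simp⟩
    · have h' : l.find? p = some b := by simpa [List.find?_cons, hx] using h
      obtain ⟨as, bs, rfl, h2⟩ := ih b h'
      exact ⟨x :: as, bs, rfl, by
        intro a ha
        rcases List.mem_cons.mp ha with rfl | ha'
        · simpa using hx
        · exact h2 a ha'⟩

theorem concat_inj {α : Type} {l₁ l₂ : List α} {a b : α} (h : l₁ ++ [a] = l₂ ++ [b]) :
    l₁ = l₂ ∧ a = b := by
  have := List.append_inj' h rfl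
  simpa using this

-- ---- the main equivalence, by strong induction on the text ----

theorem pvMain : ∀ n (t : List Char), t.length ≤ n → pvAFold t = pvScan t := by
  intro n
  induction n with
  | zero =>
    intro t ht
    have : t = [] := List.eq_nil_of_length_eq_zero (Nat.le_zero.mp ht)
    subst this
    rw [pvAFold, fold_input_nil]
    simp [pvScan]
  | succ n ih =>
    intro t ht
    match t with
    | [] =>
      rw [pvAFold, fold_input_nil]
      simp [pvScan]
    | c :: t' =>
      rcases hfind : pvMapping.find? (fun kr => kr.1.isPrefixOf (c :: t')) with _ | ⟨k, r⟩
      · -- no key matches at this position: the head character passes through everything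
        have hnone : ∀ kr ∈ pvMapping, ¬ kr.1 <+: (c :: t') := by
          intro kr hm
          have := List.find?_eq_none.mp hfind kr hm
          simpa [List.isPrefixOf_iff_prefix] using this
        have hcomm := fold_prefix_commute [c] t' pvPasses pvMemPasses
          (fun kr hm => by simpa using hnone kr (pvMemPasses kr hm))
          (fun kr hm p hp hpos => by simp at hp; omega)
          t' (afp_refl t')
        have hA : pvAFold (c :: t') = c :: pvAFold t' := by
          simpa [pvAFold] using hcomm
        rw [hA, ih t' (by simpa using Nat.lt_succ_iff.mp (by simpa using ht))]
        simp [pvScan, hfind]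
      · -- (k, r) is the first matching key: both sides emit r and continue after it
        have hkmem : (k, r) ∈ pvMapping := List.mem_of_find?_eq_some hfind
        have hkOK := pvOK _ hkmem
        have hkpre : k <+: (c :: t') := by
          have := List.find?_some hfind
          simpa [List.isPrefixOf_iff_prefix] using this
        obtain ⟨u, hu⟩ := hkpre
        obtain ⟨k1, ktl, rfl⟩ := List.exists_cons_of_ne_nil hkOK.1
        obtain rfl : c = k1 := by simpa using (congrArg List.head? hu).symm
        have ht' : t' = ktl ++ u := by simpa using hu.symm
        have htext : c :: t' = (c :: ktl) ++ u := by simp [ht']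
        have hulen : u.length ≤ n := by
          have : (c :: t').length ≤ n + 1 := ht
          rw [htext] at this
          simp at this
          omega
        -- the scan side
        have hscan : pvScan (c :: t') = r ++ pvScan u := by
          have hdrop : t'.drop ((c :: ktl).length - 1) = u := by
            rw [ht']
            simp
          rw [pvScan]
          rw [hfind]
          simp only [hdrop]
        -- split B's ordered mapping at the found key
        obtain ⟨as, bs, hsplit, hbefore⟩ := find?_split _ pvMapping _ hfind
        have hbefore' : ∀ x ∈ as, ¬ x.1 <+: ((c :: ktl) ++ u) := by
          intro x hx
          have := hbefore x hx
          rw [← htext]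
          simpa [List.isPrefixOf_iff_prefix] using this
        have hasmem : ∀ x ∈ as, x ∈ pvMapping := by
          intro x hx; rw [hsplit]; exact List.mem_append_left _ hx
        have hpp' : ∀ P : List (List Char × List Char), (∀ x ∈ P, x ∈ pvMapping) →
            ∀ kr ∈ P, ∀ p, p < (c :: ktl).length → 0 < p →
              ¬ kr.1 <+: (c :: ktl).drop p ∧ ¬ (c :: ktl).drop p <+: kr.1 := by
          intro P hPm kr hm p hp hpos
          exact pvPP (c :: ktl, r) hkmem kr (hPm kr hm) p hp hpos
        rw [hsplit] at hfind
        -- now the A side; distinguish whether the matched key is the last (the newline key)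
        rcases List.eq_nil_or_concat' bs with rfl | ⟨bs', z, rfl⟩
        · -- matched key is pvNL
          have hsp : as ++ [((c :: ktl), r)] = pvM ++ [pvNL] := by
            rw [← hsplit, pvMapping_eq]
          obtain ⟨has, hz⟩ := concat_inj hsp
          have hA : pvAFold ((c :: ktl) ++ u) = r ++ pvAFold u := by
            rw [pvAFold, pvAFold, pvPasses_eq, List.foldl_append, List.foldl_append]
            have hcomm := fold_prefix_commute (c :: ktl) u (pvM.flatMap fun kr => [kr, kr])
              (fun kr hm => by
                rw [pvMapping_eq]; exact List.mem_append_left _ (mem_dup.mp hm))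
              (fun kr hm => by
                rw [← has] at hm
                exact hbefore' kr (mem_dup.mp hm))
              (fun kr hm => by
                refine hpp' _ ?_ kr hm
                intro x hx
                rw [pvMapping_eq]; exact List.mem_append_left _ (mem_dup.mp hx))
              u (afp_refl u)
            rw [hcomm]
            have hKnl : (c :: ktl) = pvNL.1 := by rw [← hz]
            have hrnl : r = pvNL.2 := by rw [← hz]
            simp only [List.foldl_cons, List.foldl_nil]
            show pvRepl pvNL.1 pvNL.2 ((c :: ktl) ++ _) = r ++ pvRepl pvNL.1 pvNL.2 _
            rw [← hKnl, hrnl]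
            exact repl_pos _ _ _ (by simp)
          rw [htext, hA, ih u hulen, ← htext]
          exact hscan.symm
        · -- matched key is one of the 22 codes: its pass runs twice, then the rest commute
          have hsp : (as ++ ((c :: ktl), r) :: bs') ++ [z] = pvM ++ [pvNL] := by
            rw [← pvMapping_eq, hsplit]; simp
          obtain ⟨hMsplit, hz⟩ := concat_inj hsp
          have hbsmem : ∀ x ∈ bs', x ∈ pvMapping := by
            intro x hx
            rw [hsplit]
            exact List.mem_append_right _ (by simp [hx])
          have hdupP : pvPasses = (as.flatMap fun kr => [kr, kr]) ++
              (((c :: ktl), r) :: ((c :: ktl), r) :: ((bs'.flatMap fun kr => [kr, kr]) ++ [pvNL])) := by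
            rw [pvPasses_eq, ← hMsplit]
            simp [List.flatMap_append]
          have hltfree_r : ∀ ch ∈ r, ch ≠ '<' := by
            intro ch hch he
            exact hkOK.2.2.2.2.2.2 (he ▸ hch)
          have hA : pvAFold ((c :: ktl) ++ u) = r ++ pvAFold u := by
            rw [pvAFold, pvAFold, hdupP, List.foldl_append, List.foldl_append]
            have hcomm := fold_prefix_commute (c :: ktl) u (as.flatMap fun kr => [kr, kr])
              (fun kr hm => hasmem kr (mem_dup.mp hm))
              (fun kr hm => hbefore' kr (mem_dup.mp hm))
              (fun kr hm => hpp' _ (fun x hx => hasmem x (mem_dup.mp hx)) kr hm)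
              u (afp_refl u)
            rw [hcomm]
            simp only [List.foldl_cons]
            have h1 : pvStep ((c :: ktl) ++ (as.flatMap fun kr => [kr, kr]).foldl pvStep u)
                ((c :: ktl), r) = r ++ pvStep ((as.flatMap fun kr => [kr, kr]).foldl pvStep u)
                ((c :: ktl), r) := repl_pos _ _ _ (by simp)
            rw [h1]
            have h2 : ∀ X, pvStep (r ++ X) ((c :: ktl), r) = r ++ pvStep X ((c :: ktl), r) := by
              intro X
              exact repl_ltfree _ _ hkOK.2.1 r X hltfree_r
            rw [h2]
            exact fold_ltfree _ (fun kr hm => by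
                rcases List.mem_append.mp hm with hm' | hm'
                · exact (pvOK kr (hbsmem kr (mem_dup.mp hm'))).2.1
                · have : kr = pvNL := by simpa using hm'
                  exact (pvOK kr (this ▸ pvNL_mem)).2.1)
              r hltfree_r _
          rw [htext, hA, ih u hulen, ← htext]
          exact hscan.symm

-- ===== VERDICT (by name: the statement is the Claim_ definition above) =====
theorem minecraft_colors_spec : Claim_equal_minecraft_colors := by
  intro text _
  unfold Spec_minecraft_colors
  rw [minecraft_colors, minecraft_colors_alt]
  exact congrArg String.mk ((A_eq text.toList).symm.trans
    (pvMain text.toList.length text.toList le_rfl))
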